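-- pv_equiv track=rewrite | github.com/s5unanow/horadus | alembic/versions/0035_add_source_provider_keys.py | _normalize_telegram_channel_handle
-- ===== SOURCE A (Python) =====
-- def _normalize_telegram_channel_handle(channel_ref: object) -> str | None:
--     normalized = _normalize_text(channel_ref)
--     if normalized is None:
--         return None
--     prefixes = ("@", "https://t.me/", "http://t.me/", "t.me/")
--     for prefix in prefixes:
--         if normalized.startswith(prefix):
--             handle = normalized.removeprefix(prefix).split("/", 1)[0].strip()
--             return handle or None
--     return None
--
-- def _normalize_text(value: object) -> str | None:
--     if value is None:
--         return None
--     normalized = " ".join(str(value).strip().split()).lower()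
--     return normalized or None
-- ===== SOURCE B (Python) =====
-- def _normalize_text(value: object) -> str | None:
--     if value is None:
--         return None
--     normalized = " ".join(str(value).strip().split()).lower()
--     return normalized or None
--
--
-- def _normalize_telegram_channel_handle(channel_ref: object) -> str | None:
--     normalized = _normalize_text(channel_ref)
--     if normalized is None:
--         return None
--     # Tokenize once on '/' and pattern-match the segment list instead of
--     # stripping prefixes: '@x...' is segment 0 minus '@'; 't.me/x' is segments
--     # ['t.me', x, ...]; a scheme URL is ['https:'|'http:', '', 't.me', x, ...].
--     parts = normalized.split("/")
--     if parts[0].startswith("@"):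
--         handle = parts[0][1:]
--     elif parts[0] == "t.me" and len(parts) >= 2:
--         handle = parts[1]
--     elif parts[0] in ("https:", "http:") and len(parts) >= 4 and parts[1] == "" and parts[2] == "t.me":
--         handle = parts[3]
--     else:
--         return None
--     handle = handle.strip()
--     return handle or None
-- ===== Notes on version B (the rewrite author's own statement) =====
-- stated objective: alternative
-- what changed: Instead of A's loop that tries four full prefixes and strips the matched one with removeprefix+split('/',1)[0], B tokenizes the normalized text once with split('/') and pattern-matches the resulting segment list ('@x...' segment, ['t.me', x, ...], or ['https:'|'http:', '', 't.me', x, ...]), reading the handle directly out of the segments.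
import Mathlib
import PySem

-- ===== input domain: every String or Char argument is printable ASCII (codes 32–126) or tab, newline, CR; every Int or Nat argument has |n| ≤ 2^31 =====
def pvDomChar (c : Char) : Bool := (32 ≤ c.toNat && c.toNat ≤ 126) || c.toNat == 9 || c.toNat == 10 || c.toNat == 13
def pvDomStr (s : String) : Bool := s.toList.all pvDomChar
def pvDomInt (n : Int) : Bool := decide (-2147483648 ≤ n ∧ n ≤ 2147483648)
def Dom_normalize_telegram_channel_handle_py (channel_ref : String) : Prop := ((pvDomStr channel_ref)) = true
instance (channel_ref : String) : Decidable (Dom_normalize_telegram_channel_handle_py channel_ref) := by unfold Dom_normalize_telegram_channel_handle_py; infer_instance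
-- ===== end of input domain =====

-- B tokenizes the normalized text once on '/' and pattern-matches the segment list
-- (['@x…',…] / ['t.me',x,…] / ['https:'|'http:','','t.me',x,…]) instead of A's
-- prefix-strip-then-split loop; objective: alternative decomposition, same cost.

-- ===== PORT A =====
-- _normalize_text(value) for a string argument (str(value) is the identity on str;
-- the caller turns the empty result into None)
def pyNormalizeText (value : List Char) : List Char :=
  PySem.Chars.lower (PySem.Chars.join [' '] (PySem.Chars.split₀ (PySem.Chars.strip value)))

-- s.removeprefix(p), ported by hand (exact: s[len(p):] if s.startswith(p) else s)
def pyRemoveprefix (s p : List Char) : List Char :=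
  if PySem.Chars.startswith s p then s.drop p.length else s

-- the 'for prefix in prefixes' loop of A; split("/", 1) always returns a nonempty
-- list, so its [0] is the head (headD [] is exact here)
def pyHandleLoop : List (List Char) → List Char → Option String
  | [], _ => none
  | p :: ps, normalized =>
    if PySem.Chars.startswith normalized p then
      let handle := PySem.Chars.strip
        ((PySem.Chars.splitOnMax (pyRemoveprefix normalized p) ['/'] 1).headD [])
      if handle = [] then none else some (String.ofList handle)
    else pyHandleLoop ps normalized

def normalize_telegram_channel_handle_py (channel_ref : String) : Option String :=
  let normalized := pyNormalizeText channel_ref.toList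
  if normalized = [] then none   -- _normalize_text returned None
  else pyHandleLoop [['@'],
      ['h','t','t','p','s',':','/','/','t','.','m','e','/'],
      ['h','t','t','p',':','/','/','t','.','m','e','/'],
      ['t','.','m','e','/']] normalized

-- ===== PORT B =====
-- B's copy of the unchanged helper _normalize_text
def altNormalizeText (value : List Char) : List Char :=
  PySem.Chars.lower (PySem.Chars.join [' '] (PySem.Chars.split₀ (PySem.Chars.strip value)))

-- B's shared tail 'handle = handle.strip(); return handle or None'
def altFinish (tail : List Char) : Option String :=
  let handle := PySem.Chars.strip tail
  if handle = [] then none else some (String.ofList handle)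

-- normalized.split("/") for the one-char separator is exactly List.splitOn '/';
-- parts[0] is ported as headD [] (split never returns []) and parts[i] as getD i []
-- (each access is guarded by the length test before it); parts[0][1:] is drop 1.
def normalize_telegram_channel_handle_py_alt (channel_ref : String) : Option String :=
  let normalized := altNormalizeText channel_ref.toList
  if normalized = [] then none   -- _normalize_text returned None
  else
    let parts := normalized.splitOn '/'
    if PySem.Chars.startswith (parts.headD []) ['@'] then
      altFinish ((parts.headD []).drop 1)
    else if parts.headD [] = ['t','.','m','e'] ∧ 2 ≤ parts.length then
      altFinish (parts.getD 1 [])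
    else if (parts.headD [] = ['h','t','t','p','s',':'] ∨ parts.headD [] = ['h','t','t','p',':'])
        ∧ 4 ≤ parts.length ∧ parts.getD 1 [] = [] ∧ parts.getD 2 [] = ['t','.','m','e'] then
      altFinish (parts.getD 3 [])
    else none

-- ===== PRECONDITION & SPEC =====
def Spec_normalize_telegram_channel_handle_py (channel_ref : String) (out : Option String) : Prop := out = normalize_telegram_channel_handle_py_alt channel_ref
instance (channel_ref : String) (out : Option String) : Decidable (Spec_normalize_telegram_channel_handle_py channel_ref out) := by unfold Spec_normalize_telegram_channel_handle_py; infer_instance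

-- ===== CLAIM (what is proved, stated in full; the proofs are below) =====
def Claim_equal_normalize_telegram_channel_handle_py : Prop := ∀ (channel_ref : String), Dom_normalize_telegram_channel_handle_py channel_ref → Spec_normalize_telegram_channel_handle_py channel_ref (normalize_telegram_channel_handle_py channel_ref)

-- ===== LEMMAS AND PROOFS =====

-- startswith as a take-equation
theorem sw_take (n p : List Char) : PySem.Chars.startswith n p = true ↔ n.take p.length = p := by
  rw [PySem.Chars.startswith, List.isPrefixOf_iff_prefix, List.prefix_iff_eq_take]
  exact eq_comm

-- a list starts with any prefix it is an append of
theorem sw_append_self (p r : List Char) : PySem.Chars.startswith (p ++ r) p = true := by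
  rw [sw_take]; simp

-- splitOnMax.go with maxsplit exhausted keeps the rest as one chunk
theorem splitOnMax_go_zero (sep : List Char) (fuel : Nat) (l cur : List Char) (acc : List (List Char)) :
    PySem.Chars.splitOnMax.go sep fuel 0 l cur acc = ((cur.reverse ++ l) :: acc).reverse := by
  cases fuel <;> cases l <;> simp [PySem.Chars.splitOnMax.go]

-- splitOnMax.go with maxsplit 1 and empty accumulator: the first chunk of the result
theorem splitOnMax_go_one_head (fuel : Nat) : ∀ (l cur : List Char), l.length ≤ fuel →
    (PySem.Chars.splitOnMax.go ['/'] fuel 1 l cur []).headD [] =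
      cur.reverse ++ l.takeWhile (· ≠ '/') := by
  induction fuel with
  | zero => intro l cur h; simp at h; subst h; simp [PySem.Chars.splitOnMax.go]
  | succ f ih =>
    intro l cur h
    cases l with
    | nil => simp [PySem.Chars.splitOnMax.go]
    | cons c rest =>
      by_cases hc : c = '/'
      · subst hc
        simp [PySem.Chars.splitOnMax.go, splitOnMax_go_zero]
      · simp only [PySem.Chars.splitOnMax.go]
        rw [if_neg (by simp), if_neg (by simp [List.isPrefixOf]; exact fun h => hc h.symm)]
        rw [ih rest (c :: cur) (by simpa using h)]
        simp [hc]

-- l.split("/", 1)[0] is the part of l before the first '/'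
theorem splitOnMax_one_head (l : List Char) :
    (PySem.Chars.splitOnMax l ['/'] 1).headD [] = l.takeWhile (· ≠ '/') := by
  rw [PySem.Chars.splitOnMax]
  rw [if_neg (by norm_num)]
  simpa using splitOnMax_go_one_head (l.length + 1) l [] (by omega)

-- the first chunk of split("/") is the part of l before the first '/'
theorem splitOn_headD (l : List Char) : (l.splitOn '/').headD [] = l.takeWhile (· ≠ '/') := by
  induction l with
  | nil => simp [List.splitOn, List.splitOnP_nil]
  | cons c r ih =>
    simp only [List.splitOn] at *
    rw [List.splitOnP_cons]
    by_cases hc : c = '/'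
    · subst hc; simp
    · rw [if_neg (by simp [hc])]
      obtain ⟨h0, t0, he⟩ := List.exists_cons_of_ne_nil (List.splitOnP_ne_nil _ r)
      rw [he] at ih ⊢
      simp at ih
      simp [List.modifyHead, ih, List.takeWhile, hc]

-- split("/") of a list that continues after a separator-free chunk
theorem splitOn_first (a b : List Char) (h : '/' ∉ a) :
    (a ++ '/' :: b).splitOn '/' = a :: b.splitOn '/' := by
  simp only [List.splitOn]
  apply List.splitOnP_first
  · intro x hx; simp; rintro rfl; exact h hx
  · simp

-- reconstructing the list from its chunks (specialised intercalate_splitOn)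
theorem splitOn_reconstruct (l : List Char) :
    [('/' : Char)].intercalate (l.splitOn '/') = l := List.intercalate_splitOn (xs := l) '/'

-- A's matched branch computes altFinish of the chunk after the prefix
theorem branch_val (n p : List Char) (h : PySem.Chars.startswith n p = true) :
    (if PySem.Chars.strip ((PySem.Chars.splitOnMax (pyRemoveprefix n p) ['/'] 1).headD []) = []
     then (none : Option String)
     else some (String.ofList (PySem.Chars.strip ((PySem.Chars.splitOnMax (pyRemoveprefix n p) ['/'] 1).headD [])))) =
    altFinish ((n.drop p.length).takeWhile (· ≠ '/')) := by
  unfold pyRemoveprefix altFinish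
  rw [if_pos h, splitOnMax_one_head]

-- the main branch analysis, on the normalized text
theorem core_eq (n : List Char) :
    pyHandleLoop [['@'],
      ['h','t','t','p','s',':','/','/','t','.','m','e','/'],
      ['h','t','t','p',':','/','/','t','.','m','e','/'],
      ['t','.','m','e','/']] n =
    (let parts := n.splitOn '/'
     if PySem.Chars.startswith (parts.headD []) ['@'] then
       altFinish ((parts.headD []).drop 1)
     else if parts.headD [] = ['t','.','m','e'] ∧ 2 ≤ parts.length then
       altFinish (parts.getD 1 [])
     else if (parts.headD [] = ['h','t','t','p','s',':'] ∨ parts.headD [] = ['h','t','t','p',':'])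
         ∧ 4 ≤ parts.length ∧ parts.getD 1 [] = [] ∧ parts.getD 2 [] = ['t','.','m','e'] then
       altFinish (parts.getD 3 [])
     else none) := by
  simp only []
  by_cases hA : PySem.Chars.startswith n ['@'] = true
  · -- n = '@' :: r
    have ht : n.take 1 = ['@'] := (sw_take _ _).mp hA
    obtain ⟨r, rfl⟩ : ∃ r, n = '@' :: r := by
      cases n with
      | nil => simp at ht
      | cons c r => simp at ht; exact ⟨r, by rw [ht]⟩
    have hhead : (('@' :: r).splitOn '/').headD [] = '@' :: r.takeWhile (· ≠ '/') := by
      rw [splitOn_headD]; simp [List.takeWhile]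
    rw [hhead]
    rw [if_pos (by rw [sw_take]; rfl)]
    simp only [pyHandleLoop, hA, if_true]
    rw [branch_val _ _ hA]
    rfl
  · rw [Bool.not_eq_true] at hA
    by_cases hS : PySem.Chars.startswith n ['h','t','t','p','s',':','/','/','t','.','m','e','/'] = true
    · have ht : n.take 13 = ['h','t','t','p','s',':','/','/','t','.','m','e','/'] := (sw_take _ _).mp hS
      obtain ⟨r, rfl⟩ : ∃ r, n = ['h','t','t','p','s',':','/','/','t','.','m','e','/'] ++ r :=
        ⟨n.drop 13, by conv_lhs => rw [← List.take_append_drop 13 n, ht]⟩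
      have hsp : ((['h','t','t','p','s',':','/','/','t','.','m','e','/'] ++ r).splitOn '/') =
          ['h','t','t','p','s',':'] :: [] :: ['t','.','m','e'] :: r.splitOn '/' := by
        have e : (['h','t','t','p','s',':','/','/','t','.','m','e','/'] ++ r) =
            ['h','t','t','p','s',':'] ++ '/' :: ([] ++ '/' :: (['t','.','m','e'] ++ '/' :: r)) := rfl
        rw [e, splitOn_first _ _ (by decide), splitOn_first _ _ (by decide),
            splitOn_first _ _ (by decide)]
      rw [hsp]
      obtain ⟨q, qs, hq⟩ := List.exists_cons_of_ne_nil (List.splitOnP_ne_nil (· == '/') r)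
      have hq' : r.splitOn '/' = q :: qs := hq
      have hqv : q = r.takeWhile (· ≠ '/') := by
        have := splitOn_headD r; rw [hq'] at this; simpa using this
      rw [hq']
      rw [if_neg (by simp only [List.headD_cons]; decide),
          if_neg (by rintro ⟨h, -⟩; simp at h)]
      rw [if_pos ⟨Or.inl rfl, by simp only [List.length_cons]; omega, rfl, rfl⟩]
      simp only [pyHandleLoop, hA, hS, if_true, Bool.false_eq_true, if_false]
      rw [branch_val _ _ hS]
      simp [hqv]
    · rw [Bool.not_eq_true] at hS
      by_cases hH : PySem.Chars.startswith n ['h','t','t','p',':','/','/','t','.','m','e','/'] = true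
      · have ht : n.take 12 = ['h','t','t','p',':','/','/','t','.','m','e','/'] := (sw_take _ _).mp hH
        obtain ⟨r, rfl⟩ : ∃ r, n = ['h','t','t','p',':','/','/','t','.','m','e','/'] ++ r :=
          ⟨n.drop 12, by conv_lhs => rw [← List.take_append_drop 12 n, ht]⟩
        have hsp : ((['h','t','t','p',':','/','/','t','.','m','e','/'] ++ r).splitOn '/') =
            ['h','t','t','p',':'] :: [] :: ['t','.','m','e'] :: r.splitOn '/' := by
          have e : (['h','t','t','p',':','/','/','t','.','m','e','/'] ++ r) =
              ['h','t','t','p',':'] ++ '/' :: ([] ++ '/' :: (['t','.','m','e'] ++ '/' :: r)) := rfl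
          rw [e, splitOn_first _ _ (by decide), splitOn_first _ _ (by decide),
              splitOn_first _ _ (by decide)]
        rw [hsp]
        obtain ⟨q, qs, hq⟩ := List.exists_cons_of_ne_nil (List.splitOnP_ne_nil (· == '/') r)
        have hq' : r.splitOn '/' = q :: qs := hq
        have hqv : q = r.takeWhile (· ≠ '/') := by
          have := splitOn_headD r; rw [hq'] at this; simpa using this
        rw [hq']
        rw [if_neg (by simp only [List.headD_cons]; decide),
            if_neg (by rintro ⟨h, -⟩; simp at h)]
        rw [if_pos ⟨Or.inr rfl, by simp only [List.length_cons]; omega, rfl, rfl⟩]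
        simp only [pyHandleLoop, hA, hS, hH, if_true, Bool.false_eq_true, if_false]
        rw [branch_val _ _ hH]
        simp [hqv]
      · rw [Bool.not_eq_true] at hH
        by_cases hT : PySem.Chars.startswith n ['t','.','m','e','/'] = true
        · have ht : n.take 5 = ['t','.','m','e','/'] := (sw_take _ _).mp hT
          obtain ⟨r, rfl⟩ : ∃ r, n = ['t','.','m','e','/'] ++ r :=
            ⟨n.drop 5, by conv_lhs => rw [← List.take_append_drop 5 n, ht]⟩
          have hsp : ((['t','.','m','e','/'] ++ r).splitOn '/') =
              ['t','.','m','e'] :: r.splitOn '/' := by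
            have e : (['t','.','m','e','/'] ++ r) = ['t','.','m','e'] ++ '/' :: r := rfl
            rw [e, splitOn_first _ _ (by decide)]
          rw [hsp]
          obtain ⟨q, qs, hq⟩ := List.exists_cons_of_ne_nil (List.splitOnP_ne_nil (· == '/') r)
          have hq' : r.splitOn '/' = q :: qs := hq
          have hqv : q = r.takeWhile (· ≠ '/') := by
            have := splitOn_headD r; rw [hq'] at this; simpa using this
          rw [hq']
          rw [if_neg (by simp only [List.headD_cons]; decide)]
          rw [if_pos ⟨rfl, by simp only [List.length_cons]; omega⟩]
          simp only [pyHandleLoop, hA, hS, hH, hT, if_true, Bool.false_eq_true, if_false]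
          rw [branch_val _ _ hT]
          simp [hqv]
        · rw [Bool.not_eq_true] at hT
          simp only [pyHandleLoop, hA, hS, hH, hT, Bool.false_eq_true, if_false]
          -- B's three conditions are refuted from the four failed prefix tests
          rw [if_neg ?c1, if_neg ?c2, if_neg ?c3]
          case c1 =>
            intro hc
            have h1 := (sw_take _ _).mp hc
            rw [splitOn_headD] at h1
            cases hn : n with
            | nil => rw [hn] at h1; simp at h1
            | cons c r =>
              rw [hn] at h1
              by_cases hcs : c = '/'
              · simp [List.takeWhile, hcs] at h1
              · simp [List.takeWhile, hcs] at h1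
                rw [hn] at hA
                rw [(sw_take _ _).mpr (by simp [h1])] at hA
                exact Bool.true_eq_false ▸ hA
          case c2 =>
            rintro ⟨hhd, hlen⟩
            obtain ⟨a, t1, h1⟩ := List.exists_cons_of_ne_nil (List.splitOnP_ne_nil (· == '/') n)
            have h1' : n.splitOn '/' = a :: t1 := h1
            rw [h1'] at hhd hlen
            cases t1 with
            | nil => simp at hlen
            | cons b t2 =>
              rw [List.headD_cons] at hhd
              subst hhd
              have hrec := splitOn_reconstruct n
              rw [h1'] at hrec
              have hn : n = ['t','.','m','e','/'] ++ ([('/':Char)].intercalate (b :: t2)) := by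
                rw [← hrec]; simp [List.intercalate, List.intersperse]
              rw [hn, sw_append_self] at hT
              exact Bool.true_eq_false ▸ hT
          case c3 =>
            rintro ⟨hhd, hlen, hp1, hp2⟩
            obtain ⟨a, t1, h1⟩ := List.exists_cons_of_ne_nil (List.splitOnP_ne_nil (· == '/') n)
            have h1' : n.splitOn '/' = a :: t1 := h1
            rw [h1'] at hhd hlen hp1 hp2
            cases t1 with
            | nil => simp at hlen
            | cons b t2 =>
              cases t2 with
              | nil => simp at hlen
              | cons c t3 =>
                cases t3 with
                | nil => simp at hlen
                | cons d t4 =>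
                  rw [List.headD_cons] at hhd
                  simp only [List.getD_cons_succ, List.getD_cons_zero] at hp1 hp2
                  subst hp1; subst hp2
                  have hrec := splitOn_reconstruct n
                  rw [h1'] at hrec
                  rcases hhd with hhd | hhd
                  all_goals subst hhd
                  · have hn : n = ['h','t','t','p','s',':','/','/','t','.','m','e','/'] ++
                        ([('/':Char)].intercalate (d :: t4)) := by
                      rw [← hrec]; simp [List.intercalate, List.intersperse]
                    rw [hn, sw_append_self] at hS
                    exact Bool.true_eq_false ▸ hS
                  · have hn : n = ['h','t','t','p',':','/','/','t','.','m','e','/'] ++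
                        ([('/':Char)].intercalate (d :: t4)) := by
                      rw [← hrec]; simp [List.intercalate, List.intersperse]
                    rw [hn, sw_append_self] at hH
                    exact Bool.true_eq_false ▸ hH

-- ===== VERDICT (by name: the statement is the Claim_ definition above) =====
theorem normalize_telegram_channel_handle_py_spec : Claim_equal_normalize_telegram_channel_handle_py := by
  intro channel_ref _
  unfold Spec_normalize_telegram_channel_handle_py
  unfold normalize_telegram_channel_handle_py normalize_telegram_channel_handle_py_alt
  have hnorm : altNormalizeText channel_ref.toList = pyNormalizeText channel_ref.toList := rfl
  rw [hnorm]
  by_cases h : pyNormalizeText channel_ref.toList = []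
  · simp [h]
  · simp only [h, if_false]
    exact core_eq _
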